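-- pv_equiv track=rewrite | github.com/viniciusfinger/computer-science-unilasalle | algoritmos-programacao-2020-2/Trabalho G2 - Batalha Naval/game.py | verificaSeAcabouOJogo
-- ===== SOURCE A (Python) =====
-- def verificaSeAcabouOJogo(matriz):
--     pontosRestantesAFazer = 0
--
--     for linha in matriz:
--         for elemento in linha:
--             if elemento in (1, 2, 3):
--                 pontosRestantesAFazer += elemento
--
--     if pontosRestantesAFazer <= 0:
--         return True
--     else:
--         return False
-- ===== SOURCE B (Python) =====
-- def verificaSeAcabouOJogo(matriz):
--     for linha in matriz:
--         for elemento in linha: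
--             if elemento in (1, 2, 3):
--                 return False
--     return True
-- ===== Notes on version B (the rewrite author's own statement) =====
-- stated objective: simpler
-- what changed: Replaces the running-sum accumulator with a short-circuiting existence scan that returns False on the first cell in (1,2,3); valid because every counted value is strictly positive, so the sum is <= 0 iff no such cell exists.
import Mathlib
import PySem

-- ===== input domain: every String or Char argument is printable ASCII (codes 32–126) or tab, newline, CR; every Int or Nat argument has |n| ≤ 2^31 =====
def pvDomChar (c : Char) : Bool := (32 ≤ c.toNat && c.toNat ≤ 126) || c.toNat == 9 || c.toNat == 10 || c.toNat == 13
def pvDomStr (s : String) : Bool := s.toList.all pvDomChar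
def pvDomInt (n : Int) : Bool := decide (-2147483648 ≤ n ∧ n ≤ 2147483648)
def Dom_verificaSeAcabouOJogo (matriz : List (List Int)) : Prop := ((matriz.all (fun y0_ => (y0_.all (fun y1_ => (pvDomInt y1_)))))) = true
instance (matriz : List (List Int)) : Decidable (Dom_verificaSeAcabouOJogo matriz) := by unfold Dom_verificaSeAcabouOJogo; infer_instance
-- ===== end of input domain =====

-- B replaces A's running-sum accumulator by a short-circuiting existence scan (simpler; same cost).

-- ===== PORT A =====
-- inner 'for elemento in linha' loop body: add elemento when it is in (1, 2, 3)
def pvStep (acc : Int) (e : Int) : Int := if e = 1 ∨ e = 2 ∨ e = 3 then acc + e else acc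

def verificaSeAcabouOJogo (matriz : List (List Int)) : Bool :=
  let pontosRestantesAFazer :=
    matriz.foldl (fun acc linha => linha.foldl pvStep acc) 0
  if pontosRestantesAFazer ≤ 0 then true else false

-- ===== PORT B =====
-- inner loop with early 'return False': true iff some element of the row is in (1, 2, 3)
def pvRowHasPoint : List Int → Bool
  | [] => false
  | e :: t => if e = 1 ∨ e = 2 ∨ e = 3 then true else pvRowHasPoint t

def verificaSeAcabouOJogo_alt : List (List Int) → Bool
  | [] => true
  | linha :: resto => if pvRowHasPoint linha then false else verificaSeAcabouOJogo_alt resto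

-- ===== PRECONDITION & SPEC =====
def Spec_verificaSeAcabouOJogo (matriz : List (List Int)) (out : Bool) : Prop := out = verificaSeAcabouOJogo_alt matriz
instance (matriz : List (List Int)) (out : Bool) : Decidable (Spec_verificaSeAcabouOJogo matriz out) := by unfold Spec_verificaSeAcabouOJogo; infer_instance

-- ===== CLAIM (what is proved, stated in full; the proofs are below) =====
def Claim_equal_verificaSeAcabouOJogo : Prop := ∀ (matriz : List (List Int)), Dom_verificaSeAcabouOJogo matriz → Spec_verificaSeAcabouOJogo matriz (verificaSeAcabouOJogo matriz)

-- ===== LEMMAS AND PROOFS =====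
theorem pvRow_shift (row : List Int) (acc : Int) :
    row.foldl pvStep acc = acc + row.foldl pvStep 0 := by
  induction row generalizing acc with
  | nil => simp
  | cons e t ih =>
    simp only [List.foldl_cons, pvStep]
    split_ifs with h
    · rw [ih (acc + e), ih (0 + e)]; ring
    · rw [ih acc]

theorem pvRow_char (row : List Int) :
    (if pvRowHasPoint row then 1 ≤ row.foldl pvStep 0 else row.foldl pvStep 0 = 0) := by
  induction row with
  | nil => simp [pvRowHasPoint]
  | cons e t ih =>
    by_cases h : e = 1 ∨ e = 2 ∨ e = 3
    · simp only [pvRowHasPoint, pvStep, List.foldl_cons, if_pos h, if_true]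
      rw [pvRow_shift t]
      split_ifs at ih <;> rcases h with h | h | h <;> omega
    · simp only [pvRowHasPoint, pvStep, List.foldl_cons, if_neg h]
      exact ih

theorem pvMat_shift (m : List (List Int)) (acc : Int) :
    m.foldl (fun acc linha => linha.foldl pvStep acc) acc
      = acc + m.foldl (fun acc linha => linha.foldl pvStep acc) 0 := by
  induction m generalizing acc with
  | nil => simp
  | cons r t ih =>
    simp only [List.foldl_cons]
    rw [pvRow_shift r acc, pvRow_shift r 0, ih (acc + _), ih (0 + _)]
    ring

theorem pvMat_char (matriz : List (List Int)) :
    (if verificaSeAcabouOJogo_alt matriz then matriz.foldl (fun acc linha => linha.foldl pvStep acc) 0 = 0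
     else 1 ≤ matriz.foldl (fun acc linha => linha.foldl pvStep acc) 0) := by
  induction matriz with
  | nil => simp [verificaSeAcabouOJogo_alt]
  | cons row rest ih =>
    have hrow := pvRow_char row
    simp only [verificaSeAcabouOJogo_alt, List.foldl_cons]
    rw [pvMat_shift rest (List.foldl pvStep 0 row)]
    split_ifs at ih hrow ⊢ <;> simp_all <;> omega

-- ===== VERDICT (by name: the statement is the Claim_ definition above) =====
theorem verificaSeAcabouOJogo_spec : Claim_equal_verificaSeAcabouOJogo := by
  intro matriz _
  unfold Spec_verificaSeAcabouOJogo verificaSeAcabouOJogo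
  have h := pvMat_char matriz
  split_ifs at h <;> simp_all <;> omega
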